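-- pv_equiv track=rewrite | github.com/jsthomason/LearningPython | MyMods/ipv4.py | __vmo__
-- ===== SOURCE A (Python) =====
-- def __vmo__(octet):
--
--   valid = False
--   bits  = 255
--   if type(octet) == int:
--     while bits:
--       if octet == bits or octet == 0:
--         valid = True
--         break
--       bits = (bits << 1) - 256
--
--   return valid
-- ===== SOURCE B (Python) =====
-- def __vmo__(octet):
--   if type(octet) == int and 0 <= octet <= 255:
--     inv = 255 - octet
--     return inv & (inv + 1) == 0
--   return False
-- ===== Notes on version B (the rewrite author's own statement) =====
-- stated objective: simpler
-- what changed: Replaces the mask-shifting while-loop with a closed-form bit test: after a range check on the octet, its bitwise complement must consist of low-order one-bits only, checked by inv & (inv + 1) == 0.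
import Mathlib
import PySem

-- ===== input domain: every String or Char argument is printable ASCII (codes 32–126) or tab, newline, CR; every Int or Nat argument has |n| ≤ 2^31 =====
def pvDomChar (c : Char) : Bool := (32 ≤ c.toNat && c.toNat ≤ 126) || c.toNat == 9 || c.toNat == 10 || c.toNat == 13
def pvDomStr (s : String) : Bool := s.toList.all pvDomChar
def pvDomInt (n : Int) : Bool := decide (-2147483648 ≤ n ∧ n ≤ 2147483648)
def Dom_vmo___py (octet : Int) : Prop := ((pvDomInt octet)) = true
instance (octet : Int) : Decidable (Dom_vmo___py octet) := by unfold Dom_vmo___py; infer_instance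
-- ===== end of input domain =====

-- B replaces A's mask-shifting while-loop by a closed-form bit test (objective: simpler).

-- ===== PORT A =====
-- while bits: …  — ported with fuel (the loop body runs a bounded, constant number of times);
-- `bits << 1` is ported as `2 * bits` (exact for these nonnegative literals).
def vmoLoop (fuel : Nat) (octet bits : Int) (valid : Bool) : Bool :=
  match fuel with
  | 0 => valid
  | f + 1 =>
    if bits ≠ 0 then
      if octet = bits ∨ octet = 0 then true
      else vmoLoop f octet (2 * bits - 256) valid
    else valid

def vmo___py (octet : Int) : Bool :=
  -- valid = False; bits = 255; type(octet) == int is always true for an Int argument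
  vmoLoop 16 octet 255 false

-- ===== PORT B =====
def vmo___py_alt (octet : Int) : Bool :=
  if 0 ≤ octet ∧ octet ≤ 255 then
    let inv := 255 - octet
    Int.land inv (inv + 1) == 0
  else false

-- ===== PRECONDITION & SPEC =====
def Spec_vmo___py (octet : Int) (out : Bool) : Prop := out = vmo___py_alt octet
instance (octet : Int) (out : Bool) : Decidable (Spec_vmo___py octet out) := by unfold Spec_vmo___py; infer_instance

-- ===== CLAIM (what is proved, stated in full; the proofs are below) =====
def Claim_equal_vmo___py : Prop := ∀ (octet : Int), Dom_vmo___py octet → Spec_vmo___py octet (vmo___py octet)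

-- ===== LEMMAS AND PROOFS =====

-- A's loop unfolded: octet is valid iff it is one of the nine mask bytes.
theorem vmo___py_char (octet : Int) :
    vmo___py octet =
      (octet = 0 ∨ octet = 255 ∨ octet = 254 ∨ octet = 252 ∨ octet = 248 ∨
       octet = 240 ∨ octet = 224 ∨ octet = 192 ∨ octet = 128 : Bool) := by
  simp only [vmo___py, vmoLoop]
  norm_num
  by_cases h0 : octet = 0 <;> by_cases h1 : octet = 255 <;> by_cases h2 : octet = 254 <;>
    by_cases h3 : octet = 252 <;> by_cases h4 : octet = 248 <;> by_cases h5 : octet = 240 <;>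
    by_cases h6 : octet = 224 <;> by_cases h7 : octet = 192 <;> by_cases h8 : octet = 128 <;>
    simp [h0, h1, h2, h3, h4, h5, h6, h7, h8]

theorem vmo___py_alt_char (octet : Int) :
    vmo___py_alt octet =
      (octet = 0 ∨ octet = 255 ∨ octet = 254 ∨ octet = 252 ∨ octet = 248 ∨
       octet = 240 ∨ octet = 224 ∨ octet = 192 ∨ octet = 128 : Bool) := by
  unfold vmo___py_alt
  by_cases h : 0 ≤ octet ∧ octet ≤ 255
  · obtain ⟨h1, h2⟩ := h
    rw [if_pos (⟨h1, h2⟩ : 0 ≤ octet ∧ octet ≤ 255)]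
    interval_cases octet <;> decide
  · simp only [if_neg h]
    have : ¬ (octet = 0 ∨ octet = 255 ∨ octet = 254 ∨ octet = 252 ∨ octet = 248 ∨
       octet = 240 ∨ octet = 224 ∨ octet = 192 ∨ octet = 128) := by omega
    simp [this]

-- ===== VERDICT (by name: the statement is the Claim_ definition above) =====
theorem vmo___py_spec : Claim_equal_vmo___py := by
  intro octet _
  unfold Spec_vmo___py
  rw [vmo___py_char, vmo___py_alt_char]
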